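-- pv_equiv track=rewrite | github.com/braph/kc | countWordsOnBoard.py | groupByTenners
-- ===== SOURCE A (Python) =====
-- def groupByTenners(word_counts):
--     def getK(n):
--         return "%d0-%d9" % ( int(n / 10), int(n / 10)  )
--
--     words2 = {}
--     for word, count in word_counts:
--         k = getK(count)
--
--         if k not in words2:
--             words2[k] = []
--
--         words2[k].append(word)
--     return words2
-- ===== SOURCE B (Python) =====
-- def groupByTenners(word_counts):
--     def getK(n):
--         return "%d0-%d9" % ( int(n / 10), int(n / 10)  )
--
--     keys = list(dict.fromkeys(getK(count) for _, count in word_counts))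
--     return {k: [word for word, count in word_counts if getK(count) == k]
--             for k in keys}
-- ===== Notes on version B (the rewrite author's own statement) =====
-- stated objective: alternative
-- what changed: Replaces A's single mutating-dict accumulation loop with a two-phase comprehension: first compute the distinct bucket keys in first-occurrence order via dict.fromkeys, then build the dict with one filtering comprehension per key.
import Mathlib
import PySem

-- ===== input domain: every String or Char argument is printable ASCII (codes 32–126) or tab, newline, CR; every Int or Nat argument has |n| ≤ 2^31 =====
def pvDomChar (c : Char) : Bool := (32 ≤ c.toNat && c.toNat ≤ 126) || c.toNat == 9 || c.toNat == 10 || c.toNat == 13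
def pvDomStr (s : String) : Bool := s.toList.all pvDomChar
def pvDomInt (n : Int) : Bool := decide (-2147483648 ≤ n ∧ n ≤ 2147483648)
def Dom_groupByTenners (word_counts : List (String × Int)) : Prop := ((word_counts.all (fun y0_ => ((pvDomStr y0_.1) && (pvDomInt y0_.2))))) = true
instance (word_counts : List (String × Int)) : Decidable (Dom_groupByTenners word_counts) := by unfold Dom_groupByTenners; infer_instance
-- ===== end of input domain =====

-- B replaces A's single mutating-dict loop by "distinct keys first, then one filter per key";
-- objective: alternative decomposition (no speed claim). Both Pythons share the identical getK helper.

-- ===== PORT A =====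
-- getK(n) = "%d0-%d9" % (int(n/10), int(n/10)); int(n/10) truncates toward zero (Int.tdiv),
-- exact for |n| ≤ 2^31 since the float quotient never crosses an integer boundary there.
def pvGetK (n : Int) : String :=
  PySem.Int.toStr (Int.tdiv n 10) ++ "0-" ++ PySem.Int.toStr (Int.tdiv n 10) ++ "9"

def groupByTenners (word_counts : List (String × Int)) : List (String × List String) :=
  (word_counts.foldl
    (fun (words2 : PySem.Dict String (List String)) wc =>
      let word := wc.1
      let count := wc.2
      let k := pvGetK count
      let words2 := if words2.contains k then words2 else words2.insert k []
      words2.modify k [] (fun l => l ++ [word]))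
    PySem.Dict.empty).items

-- ===== PORT B =====
def groupByTenners_alt (word_counts : List (String × Int)) : List (String × List String) :=
  let keys := PySem.List.dedup (word_counts.map (fun p => pvGetK p.2))
  keys.map (fun k =>
    (k, (word_counts.filter (fun p => pvGetK p.2 == k)).map (fun p => p.1)))

-- ===== PRECONDITION & SPEC =====
def Spec_groupByTenners (word_counts : List (String × Int)) (out : List (String × List String)) : Prop := out = groupByTenners_alt word_counts
instance (word_counts : List (String × Int)) (out : List (String × List String)) : Decidable (Spec_groupByTenners word_counts out) := by unfold Spec_groupByTenners; infer_instance

-- ===== CLAIM (what is proved, stated in full; the proofs are below) =====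
def Claim_equal_groupByTenners : Prop := ∀ (word_counts : List (String × Int)), Dom_groupByTenners word_counts → Spec_groupByTenners word_counts (groupByTenners word_counts)

-- ===== LEMMAS AND PROOFS =====

-- A's loop body (setdefault-style insert then append) is one Dict.modify.
theorem pvStep_eq (d : PySem.Dict String (List String)) (k w : String) :
    ((if d.contains k then d else d.insert k []).modify k [] (fun l => l ++ [w]))
      = d.modify k [] (fun l => l ++ [w]) := by
  by_cases h : d.contains k
  · simp [h]
  · simp [PySem.Dict.modify, PySem.Dict.getD_insert_self, PySem.Dict.insert_insert_self,
      PySem.Dict.getD_of_not_contains, h]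

theorem pvFold_eq (word_counts : List (String × Int)) :
    word_counts.foldl
      (fun (words2 : PySem.Dict String (List String)) wc =>
        let word := wc.1
        let count := wc.2
        let k := pvGetK count
        let words2 := if words2.contains k then words2 else words2.insert k []
        words2.modify k [] (fun l => l ++ [word]))
      PySem.Dict.empty
      = word_counts.foldl
          (fun (d : PySem.Dict String (List String)) wc =>
            d.modify (pvGetK wc.2) [] (fun l => l ++ [wc.1]))
          PySem.Dict.empty := by
  apply List.foldl_ext
  intro d wc _
  exact pvStep_eq d (pvGetK wc.2) wc.1

theorem groupByTenners_spec : Claim_equal_groupByTenners := by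
  intro word_counts _
  unfold Spec_groupByTenners groupByTenners groupByTenners_alt
  rw [pvFold_eq]
  set D := word_counts.foldl
      (fun (d : PySem.Dict String (List String)) wc =>
        d.modify (pvGetK wc.2) [] (fun l => l ++ [wc.1]))
      PySem.Dict.empty with hD
  have hkeys : D.keys = PySem.List.dedup (word_counts.map (fun p => pvGetK p.2)) := by
    rw [hD, PySem.Dict.keys_foldl_modify_key]
    simp [PySem.Set.update_nil_left]
  have hnd : D.keys.Nodup := by
    rw [hkeys]; exact PySem.List.nodup_dedup _
  have hget : ∀ c, D.getD c [] =
      (word_counts.filter (fun p => pvGetK p.2 == c)).map (fun p => p.1) := by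
    intro c
    have hmap : word_counts.foldl
        (fun (d : PySem.Dict String (List String)) wc =>
          d.modify (pvGetK wc.2) [] (fun l => l ++ [wc.1]))
        PySem.Dict.empty
        = (word_counts.map (fun wc => (pvGetK wc.2, wc.1))).foldl
            (fun (d : PySem.Dict String (List String)) q =>
              d.modify q.1 [] (fun l => l ++ [q.2]))
            PySem.Dict.empty := by
      rw [List.foldl_map]
    rw [hD, hmap, PySem.Dict.getD_foldl_modify_append]
    simp [List.filter_map, Function.comp_def]
  rw [PySem.Dict.items_eq_map_keys D hnd [], hkeys]
  apply List.map_congr_left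
  intro k _
  rw [hget k]
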